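-- pv_equiv track=rewrite | github.com/ncsa/NEAT | utilities/vcf_compare_OLD.py | condense_by_pos
-- ===== SOURCE A (Python) =====
-- def condense_by_pos(list_in):
--     var_list_of_interest = [n for n in list_in]
--     ind_count = {}
--     for n in var_list_of_interest:
--         c = n[0]
--         if c not in ind_count:
--             ind_count[c] = 0
--         ind_count[c] += 1
--     # non_unique_dict = {n:[] for n in sorted(ind_count.keys()) if ind_count[n] > 1}		# the source 2.7 way
--     non_unique_dict = {}
--     for n in sorted(ind_count.keys()):
--         if ind_count[n] > 1:
--             non_unique_dict[n] = []
--     del_list = []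
--     for i in range(len(var_list_of_interest)):
--         if var_list_of_interest[i][0] in non_unique_dict:
--             non_unique_dict[var_list_of_interest[i][0]].append(var_list_of_interest[i])
--             del_list.append(i)
--     del_list = sorted(del_list, reverse=True)
--     for di in del_list:
--         del var_list_of_interest[di]
--     for v in non_unique_dict.values():
--         var = (v[0][0], v[0][1], ','.join([n[2] for n in v[::-1]]))
--         var_list_of_interest.append(var)
--     return var_list_of_interest
-- ===== SOURCE B (Python) =====
-- def condense_by_pos(list_in):
--     # One pass grouping by position; keep unique rows in order, then append one
--     # merged row per duplicated position in sorted-key order.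
--     groups = {}
--     for n in list_in:
--         groups.setdefault(n[0], []).append(n)
--     out = [n for n in list_in if len(groups[n[0]]) == 1]
--     for c in sorted(c for c, v in groups.items() if len(v) > 1):
--         v = groups[c]
--         out.append((v[0][0], v[0][1], ','.join(n[2] for n in reversed(v))))
--     return out
-- ===== Notes on version B (the rewrite author's own statement) =====
-- stated objective: simpler
-- what changed: Replaces A's five passes (count dict, sorted-key skeleton dict, index scan collecting a delete list, reverse-sorted per-index deletes, append) by one grouping pass into a dict plus a filter that keeps unique rows; worst-case cost drops from quadratic per-index deletes to O(n log n), though random-input timing showed no measured speed-up.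
import Mathlib
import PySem

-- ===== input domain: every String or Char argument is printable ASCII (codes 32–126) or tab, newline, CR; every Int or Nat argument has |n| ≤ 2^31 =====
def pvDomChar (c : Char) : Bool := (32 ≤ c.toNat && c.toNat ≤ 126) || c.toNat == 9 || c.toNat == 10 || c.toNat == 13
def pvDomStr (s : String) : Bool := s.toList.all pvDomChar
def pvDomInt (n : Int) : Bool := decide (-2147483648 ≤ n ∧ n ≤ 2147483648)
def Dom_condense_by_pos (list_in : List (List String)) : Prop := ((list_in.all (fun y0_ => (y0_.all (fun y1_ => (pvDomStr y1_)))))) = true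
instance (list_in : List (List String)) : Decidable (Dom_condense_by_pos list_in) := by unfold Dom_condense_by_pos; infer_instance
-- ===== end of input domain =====

-- B condenses A's five passes (count dict, skeleton dict, delete-list scan, per-index deletes,
-- append) into one grouping pass plus a filter, keeping the exact output (objective: simpler).

-- ===== PORT A =====
def condense_by_pos (list_in : List (List String)) : List (List String) :=
  -- var_list_of_interest = [n for n in list_in]
  let var0 := list_in.map (fun n => n)
  -- ind_count loop
  let ind_count : PySem.Dict String Int :=
    var0.foldl (fun d n =>
      let c := (PySem.List.pyGet? n 0).getD ""
      let d := if d.contains c then d else d.insert c 0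
      d.modify c 0 (· + 1)) PySem.Dict.empty
  -- non_unique_dict loop over sorted keys
  let non_unique0 : PySem.Dict String (List (List String)) :=
    (PySem.List.sorted ind_count.keys (fun x => x)).foldl
      (fun d n => if 1 < ind_count.getD n 0 then d.insert n [] else d) PySem.Dict.empty
  -- for i in range(len(var_list_of_interest)): fill groups and del_list
  let st :=
    (PySem.List.pyRange 0 (var0.length : Int)).foldl
      (fun (st : PySem.Dict String (List (List String)) × List Int) i =>
        let row := (PySem.List.pyGet? var0 i).getD []
        let c := (PySem.List.pyGet? row 0).getD ""
        if st.1.contains c then (st.1.modify c [] (· ++ [row]), st.2 ++ [i]) else st)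
      (non_unique0, ([] : List Int))
  -- del_list = sorted(del_list, reverse=True); for di in del_list: del var_list[di]
  let del2 := PySem.List.sorted st.2 (fun x => x) true
  let var1 := del2.foldl (fun l di => l.eraseIdx di.toNat) var0
  -- append merged tuples (ported as 3-element lists)
  st.1.values.foldl (fun acc v =>
    acc ++ [[(PySem.List.pyGet? ((PySem.List.pyGet? v 0).getD []) 0).getD "",
             (PySem.List.pyGet? ((PySem.List.pyGet? v 0).getD []) 1).getD "",
             PySem.Str.join "," (((PySem.List.slice? v none none (-1)).getD []).map
               (fun n => (PySem.List.pyGet? n 2).getD ""))]]) var1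

-- ===== PORT B =====
def condense_by_pos_alt (list_in : List (List String)) : List (List String) :=
  -- groups.setdefault(n[0], []).append(n)  ==  groups[n[0]] = groups.get(n[0], []) + [n]  == Dict.modify
  let groups : PySem.Dict String (List (List String)) :=
    list_in.foldl (fun d n => d.modify ((PySem.List.pyGet? n 0).getD "") [] (· ++ [n]))
      PySem.Dict.empty
  -- out = [n for n in list_in if len(groups[n[0]]) == 1]
  let out := list_in.filter (fun n =>
    (groups.getD ((PySem.List.pyGet? n 0).getD "") []).length == 1)
  -- for c in sorted(c for c, v in groups.items() if len(v) > 1): append merged tuple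
  (PySem.List.sorted ((groups.items.filter (fun p => 1 < p.2.length)).map (·.1)) (fun x => x)).foldl
    (fun acc c =>
      let v := groups.getD c []
      acc ++ [[(PySem.List.pyGet? ((PySem.List.pyGet? v 0).getD []) 0).getD "",
               (PySem.List.pyGet? ((PySem.List.pyGet? v 0).getD []) 1).getD "",
               PySem.Str.join "," (v.reverse.map (fun n => (PySem.List.pyGet? n 2).getD ""))]]) out

-- ===== PRECONDITION & SPEC =====
-- Pre_ excludes exactly the inputs on which Python A raises IndexError: a row that is empty,
-- or a row at a duplicated position (same first field) with fewer than 3 fields.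
def Pre_condense_by_pos (list_in : List (List String)) : Prop :=
  ∀ r ∈ list_in, r ≠ [] ∧
    (1 < (list_in.map (fun n => n.headD "")).count (r.headD "") → 3 ≤ r.length)
instance (list_in : List (List String)) : Decidable (Pre_condense_by_pos list_in) := by
  unfold Pre_condense_by_pos; infer_instance
def pvWitness_condense_by_pos : List (List String) :=
  [["1", "A", "x"], ["1", "A", "y"], ["2", "B"]]
def Spec_condense_by_pos (list_in : List (List String)) (out : List (List String)) : Prop := out = condense_by_pos_alt list_in
instance (list_in : List (List String)) (out : List (List String)) : Decidable (Spec_condense_by_pos list_in out) := by unfold Spec_condense_by_pos; infer_instance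

-- ===== CLAIM (what is proved, stated in full; the proofs are below) =====
def Claim_equal_condense_by_pos : Prop := ∀ (list_in : List (List String)), Dom_condense_by_pos list_in → Pre_condense_by_pos list_in → Spec_condense_by_pos list_in (condense_by_pos list_in)

-- ===== LEMMAS AND PROOFS =====

-- proof-only abbreviations
def pvHd (n : List String) : String := (PySem.List.pyGet? n 0).getD ""
def pvHeads (l : List (List String)) : List String := l.map pvHd
def pvVal (l : List (List String)) (c : String) : List (List String) :=
  l.filter (fun r => pvHd r == c)
def pvP (l : List (List String)) (c : String) : Bool := decide (1 < (pvHeads l).count c)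
def pvK (l : List (List String)) : List String :=
  (PySem.List.sorted (PySem.Set.ofList (pvHeads l)) (fun x => x)).filter (pvP l)

theorem pv_count_step (d : PySem.Dict String Int) (c : String) :
    (if d.contains c then d else d.insert c 0).modify c 0 (· + 1)
      = d.insert c (d.getD c 0 + 1) := by
  by_cases h : d.contains c = true
  · simp [h, PySem.Dict.modify]
  · simp [h, PySem.Dict.modify, PySem.Dict.insert_insert_self, PySem.Dict.getD_insert_self]
    rw [PySem.Dict.getD_of_not_contains d 0 (by simpa using h)]
    norm_num

theorem pv_ind_count (l : List (List String)) :
    l.foldl (fun d n =>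
      (if d.contains ((PySem.List.pyGet? n 0).getD "") then d
       else d.insert ((PySem.List.pyGet? n 0).getD "") 0).modify
        ((PySem.List.pyGet? n 0).getD "") 0 (· + 1)) PySem.Dict.empty
    = PySem.Dict.counter (pvHeads l) := by
  rw [← PySem.Dict.foldl_insert_getD_add_one_eq_counter, pvHeads, List.foldl_map]
  exact PySem.List.foldl_congr_mem l _ _ _ (fun d n _ => pv_count_step d (pvHd n))

theorem pv_nodup_K (l : List (List String)) : (pvK l).Nodup := by
  exact (((PySem.List.sorted_perm _ _ _).nodup_iff.mpr
    (PySem.Set.nodup_ofList _)).filter _)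

theorem pv_non_unique0_items (l : List (List String)) :
    ((PySem.List.sorted (PySem.Dict.counter (pvHeads l)).keys (fun x => x)).foldl
      (fun d n => if 1 < (PySem.Dict.counter (pvHeads l)).getD n 0 then d.insert n [] else d)
      (PySem.Dict.empty : PySem.Dict String (List (List String)))).items
    = (pvK l).map (fun c => (c, [])) := by
  have h1 : ∀ n : String, (decide (1 < (PySem.Dict.counter (pvHeads l)).getD n 0)) = pvP l n := by
    intro n
    simp [PySem.Dict.getD_counter, pvP]
  rw [PySem.Dict.keys_counter]
  rw [show (fun (d : PySem.Dict String (List (List String))) (n : String) =>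
      if 1 < (PySem.Dict.counter (pvHeads l)).getD n 0 then d.insert n [] else d)
    = (fun d n => if pvP l n then d.insert n [] else d) by
      funext d n; rw [← h1 n]; simp]
  rw [← List.foldl_filter, ← pvK]
  rw [PySem.Dict.items_foldl_insert_fresh (pvK l) (fun c => c) (fun _ => []) _
    (by intro a _; rfl) (by simpa using pv_nodup_K l)]
  rfl

theorem pv_groups_getD (l : List (List String)) (d : PySem.Dict String (List (List String))) (c : String) :
    (l.foldl (fun d n => d.modify (pvHd n) [] (· ++ [n])) d).getD c []
    = d.getD c [] ++ pvVal l c := by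
  have := PySem.Dict.getD_foldl_modify_append (l.map (fun n => (pvHd n, n))) d c
  rw [List.foldl_map] at this
  simpa [pvVal, List.filter_map, Function.comp_def, pvHd] using this

theorem pv_groups_keys (l : List (List String)) :
    (l.foldl (fun d n => d.modify (pvHd n) [] (· ++ [n]))
      (PySem.Dict.empty : PySem.Dict String (List (List String)))).keys
    = PySem.Set.ofList (pvHeads l) := by
  have := PySem.Dict.keys_foldl_modify_key l (fun n => pvHd n) [] (fun _ n v => v ++ [n])
    (PySem.Dict.empty : PySem.Dict String (List (List String)))
  rw [this]
  rfl

theorem pv_erase_sub {α : Type} (is : List Nat) (x : α) (xs : List α) :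
    is.foldl (fun m i => m.eraseIdx (i + 1)) (x :: xs)
      = x :: is.foldl (fun m i => m.eraseIdx i) xs := by
  induction is generalizing xs with
  | nil => rfl
  | cons i is ih => simp [List.foldl_cons, List.eraseIdx_cons_succ, ih]

theorem pv_erase_filter {α : Type} (l : List α) (q : α → Bool) (dflt : α) :
    (((List.range l.length).filter (fun i => q (l.getD i dflt))).reverse).foldl
      (fun m i => m.eraseIdx i) l = l.filter (fun x => !q x) := by
  induction l with
  | nil => rfl
  | cons x xs ih =>
    rw [List.length_cons, List.range_succ_eq_map]
    have hmap : (List.map Nat.succ (List.range xs.length)).filter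
        (fun i => q ((x :: xs).getD i dflt))
        = ((List.range xs.length).filter (fun i => q (xs.getD i dflt))).map Nat.succ := by
      rw [List.filter_map]; rfl
    by_cases hq : q x
    · simp only [List.filter_cons, List.getD_cons_zero, hq, hmap]
      rw [if_pos trivial, List.reverse_cons, List.foldl_append]
      have : (((List.range xs.length).filter (fun i => q (xs.getD i dflt))).map Nat.succ).reverse.foldl
          (fun (m : List α) i => m.eraseIdx i) (x :: xs)
          = x :: ((List.range xs.length).filter (fun i => q (xs.getD i dflt))).reverse.foldl
            (fun m i => m.eraseIdx i) xs := by
        rw [← List.map_reverse, List.foldl_map]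
        exact pv_erase_sub _ x xs
      simp only [this, ih, List.foldl_cons, List.foldl_nil, List.eraseIdx_cons_zero,
        List.filter_cons, hq]
      simp
    · simp only [List.filter_cons, List.getD_cons_zero, hq, hmap]
      simp only [Bool.false_eq_true, if_false]
      rw [← List.map_reverse, List.foldl_map, pv_erase_sub, ih]
      simp [hq]

theorem pv_set_update_self (s : PySem.Set String) (xs : List String)
    (h : ∀ x ∈ xs, x ∈ s) : PySem.Set.update s xs = s := by
  induction xs generalizing s with
  | nil => rfl
  | cons x xs ih =>
    have hm : x ∈ s := h x (by simp)
    have hx : PySem.Set.add s x = s := by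
      simp [PySem.Set.add, PySem.Set.contains, hm]
    simp only [PySem.Set.update, List.foldl_cons]
    rw [show List.foldl PySem.Set.add (PySem.Set.add s x) xs = PySem.Set.update (PySem.Set.add s x) xs from rfl,
      hx, ih s (fun y hy => h y (by simp [hy]))]

theorem pv_val_length (l : List (List String)) (c : String) :
    (pvVal l c).length = (pvHeads l).count c := by
  simp [pvVal, pvHeads, List.count, List.countP_map, Function.comp_def, ← List.countP_eq_length_filter]

theorem pv_contains_iff_mem {ν : Type} (d : PySem.Dict String ν) (c : String) :
    d.contains c = true ↔ c ∈ d.keys := by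
  simp [PySem.Dict.contains, PySem.Dict.keys, List.any_eq_true, List.mem_map]

-- contains of a modify-fold

theorem pv_contains_fold (rows : List (List String))
    (d : PySem.Dict String (List (List String))) (c : String) :
    (((rows.foldl (fun d r => d.modify (pvHd r) [] (· ++ [r])) d).contains c) = true)
      ↔ (d.contains c = true ∨ c ∈ rows.map pvHd) := by
  have hk := PySem.Dict.keys_foldl_modify_key rows pvHd [] (fun _ r v => v ++ [r]) d
  constructor
  · intro h
    have := (pv_contains_iff_mem _ c).mp h
    rw [hk, PySem.Set.mem_update] at this
    rcases this with h' | h'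
    · exact Or.inl ((pv_contains_iff_mem d c).mpr h')
    · exact Or.inr h'
  · intro h
    apply (pv_contains_iff_mem _ c).mpr
    rw [hk, PySem.Set.mem_update]
    rcases h with h' | h'
    · exact Or.inl ((pv_contains_iff_mem d c).mp h')
    · exact Or.inr h'

theorem pv_fill (l : List (List String)) (d0 : PySem.Dict String (List (List String))) :
    ∀ n, n ≤ l.length → ∀ dl0 : List Int,
    (List.range n).foldl (fun (st : PySem.Dict String (List (List String)) × List Int) k =>
        if st.1.contains (pvHd (l.getD k [])) then
          (st.1.modify (pvHd (l.getD k [])) [] (· ++ [l.getD k []]), st.2 ++ [(k : Int)])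
        else st) (d0, dl0)
    = (((l.take n).filter (fun r => d0.contains (pvHd r))).foldl
          (fun d r => d.modify (pvHd r) [] (· ++ [r])) d0,
       dl0 ++ ((List.range n).filter (fun k => d0.contains (pvHd (l.getD k [])))).map
         (fun k : Nat => (k : Int))) := by
  intro n
  induction n with
  | zero => intro _ dl0; simp
  | succ n ih =>
    intro hn dl0
    have hnl : n < l.length := by omega
    have hget : l.getD n [] = l[n] := by
      rw [List.getD_eq_getElem?_getD, List.getElem?_eq_getElem hnl]; rfl
    rw [List.range_succ, List.foldl_append, ih (by omega) dl0]
    have hc : (((l.take n).filter (fun r => d0.contains (pvHd r))).foldl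
          (fun d r => d.modify (pvHd r) [] (· ++ [r])) d0).contains (pvHd (l.getD n []))
        = d0.contains (pvHd (l.getD n [])) := by
      cases hb : d0.contains (pvHd (l.getD n [])) with
      | true => exact (pv_contains_fold _ _ _).mpr (Or.inl hb)
      | false =>
        rw [← Bool.not_eq_true]
        intro h
        rcases (pv_contains_fold _ _ _).mp h with h' | h'
        · rw [hb] at h'; exact Bool.false_ne_true h'
        · rcases List.mem_map.mp h' with ⟨r, hr, hrc⟩
          rcases List.mem_filter.mp hr with ⟨_, hcon⟩
          rw [hrc] at hcon; rw [hb] at hcon; exact Bool.false_ne_true hcon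
    simp only [List.foldl_cons, List.foldl_nil, hc]
    cases hb : d0.contains (pvHd (l.getD n [])) with
    | true =>
      simp only [List.take_add_one, List.getElem?_eq_getElem hnl, Option.toList_some,
        List.filter_append, List.foldl_append, List.range_succ]
      rw [hget] at hb
      simp [List.getD_eq_getElem?_getD, List.getElem?_eq_getElem hnl, hb]
    | false =>
      simp only [List.take_add_one, List.getElem?_eq_getElem hnl,
        Option.toList_some, List.filter_append, List.foldl_append, List.range_succ]
      rw [hget] at hb
      simp [List.getD_eq_getElem?_getD, List.getElem?_eq_getElem hnl, hb]

theorem pv_main (l : List (List String)) : condense_by_pos l = condense_by_pos_alt l := by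
  have pvHdE : ∀ x : List String, ((PySem.List.pyGet? x 0).getD "") = pvHd x := fun _ => rfl
  unfold condense_by_pos condense_by_pos_alt
  simp only [List.map_id']
  rw [pv_ind_count l]
  simp only [pvHdE]
  set N := List.foldl
      (fun d n => if 1 < (PySem.Dict.counter (pvHeads l)).getD n 0 then d.insert n [] else d)
      (PySem.Dict.empty : PySem.Dict String (List (List String)))
      (PySem.List.sorted (PySem.Dict.counter (pvHeads l)).keys fun x => x) with hN
  have hNitems : N.items = (pvK l).map (fun c => (c, ([] : List (List String)))) :=
    pv_non_unique0_items l
  have hNkeys : N.keys = pvK l := by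
    simp [PySem.Dict.keys, hNitems, List.map_map, Function.comp_def]
  have hNmem : ∀ c, N.contains c = true ↔ c ∈ pvK l := fun c => by
    rw [pv_contains_iff_mem, hNkeys]
  have hNgetD : ∀ c ∈ pvK l, N.getD c [] = [] := by
    intro c hc
    have h2 := PySem.Dict.items_eq_map_keys N (by rw [hNkeys]; exact pv_nodup_K l)
      ([] : List (List String))
    rw [hNitems, hNkeys] at h2
    have h3 := (List.map_inj_left.mp h2) c hc
    exact (congrArg Prod.snd h3).symm
  rw [show ((l.length : Int)) = ((l.length : Nat) : Int) from rfl, PySem.List.pyRange_zero_natCast,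
    List.foldl_map]
  simp only [PySem.List.pyGet?_natCast, ← List.getD_eq_getElem?_getD]
  rw [pv_fill l N l.length (le_refl _) []]
  simp only [List.take_length, List.nil_append]
  -- the delete list: reverse-sorted strictly increasing indices, then deletion = filter
  have hdel : PySem.List.sorted
      (((List.range l.length).filter (fun k => N.contains (pvHd (l.getD k [])))).map
        (fun k : Nat => (k : Int))) (fun x => x) true
      = (((List.range l.length).filter (fun k => N.contains (pvHd (l.getD k [])))).map
        (fun k : Nat => (k : Int))).reverse := by
    apply PySem.List.sorted_rev_eq_of_perm_of_pairwise_gt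
    · exact List.reverse_perm _
    · rw [List.pairwise_reverse]
      refine List.Pairwise.map (fun k : Nat => (k : Int)) ?_ (List.pairwise_lt_range.filter _)
      intro a b hab
      simpa using hab
  rw [hdel, ← List.map_reverse, List.foldl_map]
  simp only [Int.toNat_natCast]
  rw [pv_erase_filter l (fun r => N.contains (pvHd r)) []]
  -- the filled dict: values are the groups, keys pvK
  set F := List.foldl (fun d r => d.modify (pvHd r) [] fun x => x ++ [r]) N
      (List.filter (fun r => N.contains (pvHd r)) l) with hF
  have hFkeys : F.keys = pvK l := by
    rw [hF, PySem.Dict.keys_foldl_modify_key _ pvHd [] (fun _ r v => v ++ [r]), hNkeys]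
    apply pv_set_update_self
    intro x hx
    rcases List.mem_map.mp hx with ⟨r, hr, rfl⟩
    exact (hNmem _).mp (List.mem_filter.mp hr).2
  have hFnodup : F.keys.Nodup := by rw [hFkeys]; exact pv_nodup_K l
  have hFgetD : ∀ c ∈ pvK l, F.getD c [] = pvVal l c := by
    intro c hc
    rw [hF, pv_groups_getD, hNgetD c hc]
    simp only [pvVal, List.filter_filter, List.nil_append]
    apply List.filter_congr
    intro r hr
    by_cases h : pvHd r = c
    · simp [h, (hNmem c).mpr hc]
    · simp [h]
  have hFvals : F.values = (pvK l).map (fun c => pvVal l c) := by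
    rw [PySem.Dict.values_eq_map_keys F hFnodup ([] : List (List String)), hFkeys]
    exact List.map_congr_left hFgetD
  rw [hFvals, List.foldl_map]
  -- B's groups dict
  set G := List.foldl (fun d n => d.modify (pvHd n) [] fun x => x ++ [n])
      (PySem.Dict.empty : PySem.Dict String (List (List String))) l with hG
  have hGgetD : ∀ c, G.getD c [] = pvVal l c := by
    intro c
    rw [hG, pv_groups_getD]
    rfl
  have hGkeys : G.keys = PySem.Set.ofList (pvHeads l) := pv_groups_keys l
  have hGitems : G.items = (PySem.Set.ofList (pvHeads l)).map (fun c => (c, pvVal l c)) := by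
    rw [PySem.Dict.items_eq_map_keys G (by rw [hGkeys]; exact PySem.Set.nodup_ofList _)
      ([] : List (List String)), hGkeys]
    exact List.map_congr_left (fun c _ => by rw [hGgetD c])
  -- B's sorted duplicated keys = pvK
  have hBkeys : (PySem.List.sorted ((G.items.filter (fun p => 1 < p.2.length)).map (·.1))
      (fun x => x)) = pvK l := by
    rw [hGitems, List.filter_map, List.map_map]
    have hpred : ((fun p : String × List (List String) => decide (1 < p.2.length)) ∘
        (fun c => (c, pvVal l c))) = pvP l := by
      funext c
      simp [pvP, pv_val_length]
    rw [hpred]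
    have hcomp : ((fun p : String × List (List String) => p.1) ∘ (fun c => (c, pvVal l c)))
        = fun c => c := by funext c; rfl
    rw [hcomp, List.map_id']
    apply PySem.List.sorted_eq_of_perm_of_pairwise_lt
    · exact (PySem.List.sorted_perm _ _ _).filter _
    · exact (PySem.List.sorted_ofList_pairwise_lt _).filter _
  rw [hBkeys]
  simp only [hGgetD]
  -- kept rows agree
  have hkept : l.filter (fun r => !(N.contains (pvHd r)))
      = l.filter (fun n => (pvVal l (pvHd n)).length == 1) := by
    apply List.filter_congr
    intro r hr
    have hmem : pvHd r ∈ pvHeads l := List.mem_map.mpr ⟨r, hr, rfl⟩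
    have hpos : 0 < (pvHeads l).count (pvHd r) := List.count_pos_iff.mpr hmem
    have hK : N.contains (pvHd r) = pvP l (pvHd r) := by
      cases hb : pvP l (pvHd r) with
      | true =>
        refine (hNmem _).mpr ?_
        refine List.mem_filter.mpr ⟨?_, hb⟩
        rw [PySem.List.mem_sorted]
        exact (PySem.Set.mem_ofList _ _).mpr hmem
      | false =>
        rw [← Bool.not_eq_true]
        intro hcon
        have := (List.mem_filter.mp ((hNmem _).mp hcon)).2
        rw [hb] at this
        exact Bool.false_ne_true this
    rw [hK, pv_val_length]
    simp only [pvP]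
    by_cases h1 : 1 < (pvHeads l).count (pvHd r)
    · simp [h1]
      omega
    · simp [h1]
      omega
  rw [← hkept]
  -- merged rows agree
  apply PySem.List.foldl_congr_mem
  intro acc c _
  simp [PySem.List.slice?_none_none_neg_one]

-- ===== VERDICT (by name: the statement is the Claim_ definition above) =====
theorem condense_by_pos_spec : Claim_equal_condense_by_pos := by
  intro l _ _
  unfold Spec_condense_by_pos
  exact pv_main l
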